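-- pv_equiv track=rewrite | github.com/pypi-data/pypi-mirror-383 | packages/geqo/geqo-0.1.2.tar.gz/geqo-0.1.2/src/geqo/visualization/common.py | pack_gates
-- ===== SOURCE A (Python) =====
-- def pack_gates(operations: list):
--     """Compactify the circuit diagram by placing non-conflicting operations that can be implemented simultaneously into the same execution layer(column) of the circuit.
--
--     Args:
--         operations (list): A list of operations, where each operation is a tuple
--             of the form (gate, target_qubits, target_bits). `target_qubits` is a list of qubit indices
--             the gate acts on.
--
--     Returns:
--         list: A list of columns, where each column is a list of operations
--         that can be executed in parallel. The columns preserve execution order.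
--
--     """
--     columns = []
--     while operations:  # loop until all gates have been placed in a column
--         current_col = []
--         already_visited = set()  # track lines that are either already occupied by a gate or used by subsequent gate
--         unplaced_gates = []  # store gates that still need to be placed
--
--         for gate in operations:
--             target = gate[1]
--
--             if already_visited.isdisjoint(
--                 range(min(target), max(target) + 1)
--             ):  # no conflict, place it
--                 current_col.append(gate)
--             else:
--                 unplaced_gates.append(gate)  # keep for a next column
--             # even if it's not placed, if the bits are used by a subsequent gate then the gate must not be placed
--             if len(target) == 1:
--                 already_visited.update(target)
--             else:
--                 already_visited.update(
--                     range(min(target), max(target) + 1)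
--                 )  # a multi-qubit gate "blocks" all the qubits between the min and max
--
--         columns.append(current_col)
--         operations = unplaced_gates  # update elements to only unplaced ones
--
--     return columns
-- ===== SOURCE B (Python) =====
-- def pack_gates(operations: list):
--     """Single left-to-right pass: each gate's column is 1 + the highest column
--     among earlier gates whose blocked qubit interval [min,max] overlaps its own."""
--     columns = []
--     placed = []  # (lo, hi, col) of every gate already assigned
--     for gate in operations:
--         target = gate[1]
--         lo, hi = min(target), max(target)
--         col = 0
--         for plo, phi, pcol in placed:
--             if plo <= hi and lo <= phi and pcol + 1 > col:
--                 col = pcol + 1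
--         placed.append((lo, hi, col))
--         if col == len(columns):
--             columns.append([gate])
--         else:
--             columns[col].append(gate)
--     return columns
-- ===== Notes on version B (the rewrite author's own statement) =====
-- stated objective: faster
-- what changed: A repeatedly rescans the still-unplaced gate list round by round, rebuilding a visited-qubit set from per-qubit ranges each round; B makes one left-to-right pass, giving each gate column 1 + the max column of earlier gates whose [min,max] qubit interval overlaps its own, so the rounds and the per-qubit range materialisation disappear.
import Mathlib
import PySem

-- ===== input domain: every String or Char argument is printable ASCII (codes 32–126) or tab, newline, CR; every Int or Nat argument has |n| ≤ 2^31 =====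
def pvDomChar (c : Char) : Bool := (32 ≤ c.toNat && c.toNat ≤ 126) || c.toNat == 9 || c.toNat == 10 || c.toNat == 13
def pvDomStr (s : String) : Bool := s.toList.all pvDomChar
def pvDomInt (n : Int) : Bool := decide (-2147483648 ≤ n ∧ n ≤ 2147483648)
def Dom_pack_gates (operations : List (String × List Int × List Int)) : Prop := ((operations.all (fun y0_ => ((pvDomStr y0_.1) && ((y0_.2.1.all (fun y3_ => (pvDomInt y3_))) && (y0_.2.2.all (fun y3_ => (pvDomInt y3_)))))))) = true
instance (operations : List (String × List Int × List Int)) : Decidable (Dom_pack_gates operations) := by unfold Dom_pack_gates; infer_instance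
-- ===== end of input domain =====

-- B replaces A's repeated whole-list passes with visited-qubit sets by ONE left-to-right pass that
-- assigns each gate the column 1 + max column of earlier gates with overlapping [min,max] intervals.

-- ===== PORT A =====

-- one round of A's while loop: the 'for gate in operations' pass with the visited set
-- (the Python set of visited qubits is kept as a Std.HashSet Int; isdisjoint iterates the
-- range argument and update = insertMany, exactly CPython's set.isdisjoint/set.update)
def packPassA : List (String × List Int × List Int) → Std.HashSet Int →
    List (String × List Int × List Int) → List (String × List Int × List Int) →
    (List (String × List Int × List Int) × List (String × List Int × List Int))
  | [], _, cur, unp => (cur, unp)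
  | g :: rest, visited, cur, unp =>
    let t := g.2.1
    let lo := (PySem.List.min? t (fun x => x)).getD 0
    let hi := (PySem.List.max? t (fun x => x)).getD 0
    let rng := PySem.List.pyRange lo (hi + 1) 1
    let placed := rng.all (fun q => !visited.contains q)
    let cur' := if placed then cur ++ [g] else cur
    let unp' := if placed then unp else unp ++ [g]
    let visited' := if t.length = 1 then visited.insertMany t else visited.insertMany rng
    packPassA rest visited' cur' unp'

-- the pass splits its input between the two accumulators, so the unplaced part is bounded
theorem packPassA_len (ops : List (String × List Int × List Int)) :
    ∀ v cur unp, (packPassA ops v cur unp).2.length ≤ unp.length + ops.length := by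
  induction ops with
  | nil => intro v cur unp; simp [packPassA]
  | cons g rest ih =>
    intro v cur unp
    simp only [packPassA]
    refine le_trans (ih _ _ _) ?_
    split
    · simp
    · simp
      omega

-- with an empty visited set the first gate is always placed
theorem packPassA_first (g : String × List Int × List Int)
    (rest : List (String × List Int × List Int)) :
    (packPassA (g :: rest) ∅ [] []).2.length ≤ rest.length := by
  simp only [packPassA]
  have hd : (PySem.List.pyRange ((PySem.List.min? g.2.1 (fun x => x)).getD 0)
      (((PySem.List.max? g.2.1 (fun x => x)).getD 0) + 1) 1).all
        (fun q => !(∅ : Std.HashSet Int).contains q) = true := by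
    rw [List.all_eq_true]
    intro q _
    simp
  simp only [hd, if_true]
  exact le_trans (packPassA_len _ _ _ _) (by simp)

-- the while loop of A
def packLoopA : List (String × List Int × List Int) → List (List (String × List Int × List Int))
  | [] => []
  | g :: rest =>
    let p := packPassA (g :: rest) ∅ [] []
    p.1 :: packLoopA p.2
  termination_by ops => ops.length
  decreasing_by
    simpa using Nat.lt_succ_of_le (packPassA_first g rest)

def pack_gates (operations : List (String × List Int × List Int)) : List (List (String × List Int × List Int)) :=
  packLoopA operations

-- ===== PORT B =====

-- the body of B's single for-loop: assign a column to one gate and append it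
def altStep (st : List (List (String × List Int × List Int)) × List (Int × Int × Nat))
    (gate : String × List Int × List Int) :
    List (List (String × List Int × List Int)) × List (Int × Int × Nat) :=
  let t := gate.2.1
  let lo := (PySem.List.min? t (fun x => x)).getD 0
  let hi := (PySem.List.max? t (fun x => x)).getD 0
  let col := st.2.foldl
    (fun c p => if p.1 ≤ hi ∧ lo ≤ p.2.1 ∧ c < p.2.2 + 1 then p.2.2 + 1 else c) 0
  let columns := if col = st.1.length then st.1 ++ [[gate]]
                 else st.1.modify col (· ++ [gate])
  (columns, st.2 ++ [(lo, hi, col)])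

def pack_gates_alt (operations : List (String × List Int × List Int)) : List (List (String × List Int × List Int)) :=
  (operations.foldl altStep ([], [])).1

-- ===== PRECONDITION & SPEC =====
-- Pre_ excludes operations containing a gate with an empty qubit list: there A raises
-- ValueError (min of an empty sequence), and B raises the same way.
def Pre_pack_gates (operations : List (String × List Int × List Int)) : Prop :=
  ∀ g ∈ operations, g.2.1 ≠ []
instance (operations : List (String × List Int × List Int)) : Decidable (Pre_pack_gates operations) := by unfold Pre_pack_gates; infer_instance

def pvWitness_pack_gates : (List (String × List Int × List Int)) :=
  [("h", [0], []), ("cx", [0, 2], [1]), ("x", [1], []), ("m", [2], [0])]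

def Spec_pack_gates (operations : List (String × List Int × List Int)) (out : List (List (String × List Int × List Int))) : Prop := out = pack_gates_alt operations
instance (operations : List (String × List Int × List Int)) (out : List (List (String × List Int × List Int))) : Decidable (Spec_pack_gates operations out) := by unfold Spec_pack_gates; infer_instance

-- ===== CLAIM (what is proved, stated in full; the proofs are below) =====
def Claim_equal_pack_gates : Prop := ∀ (operations : List (String × List Int × List Int)), Dom_pack_gates operations → Pre_pack_gates operations → Spec_pack_gates operations (pack_gates operations)

-- ===== LEMMAS AND PROOFS =====

-- ghost definitions used only by the proofs
def gLo (g : String × List Int × List Int) : Int := (PySem.List.min? g.2.1 (fun x => x)).getD 0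
def gHi (g : String × List Int × List Int) : Int := (PySem.List.max? g.2.1 (fun x => x)).getD 0

-- blocked-interval overlap
def gOv (h g : String × List Int × List Int) : Prop := gLo h ≤ gHi g ∧ gLo g ≤ gHi h

-- B's inner loop over annotated predecessors, starting from c0
def colFold (g : String × List Int × List Int) (c0 : Nat)
    (acc : List ((String × List Int × List Int) × Nat)) : Nat :=
  acc.foldl (fun c p => if gLo p.1 ≤ gHi g ∧ gLo g ≤ gHi p.1 ∧ c < p.2 + 1 then p.2 + 1 else c) c0

def colOf (acc : List ((String × List Int × List Int) × Nat)) (g : String × List Int × List Int) : Nat :=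
  colFold g 0 acc

-- annotate each gate with its column, given annotations of the preceding gates
def annG (acc : List ((String × List Int × List Int) × Nat)) :
    List (String × List Int × List Int) → List ((String × List Int × List Int) × Nat)
  | [] => []
  | g :: t => (g, colOf acc g) :: annG (acc ++ [(g, colOf acc g)]) t

-- annotations surviving into the next round, columns shifted down by one
def decF (acc : List ((String × List Int × List Int) × Nat)) :
    List ((String × List Int × List Int) × Nat) :=
  (acc.filter (fun p => p.2 != 0)).map (fun p => (p.1, p.2 - 1))

theorem decF_sum (acc : List ((String × List Int × List Int) × Nat)) :
    ((decF acc).map (fun p => p.2 + 1)).sum + acc.length = (acc.map (fun p => p.2 + 1)).sum := by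
  induction acc with
  | nil => rfl
  | cons p acc ih =>
    by_cases h : p.2 = 0 <;> simp [decF, h] at ih ⊢ <;> omega

theorem decF_measure (acc : List ((String × List Int × List Int) × Nat)) (h : acc ≠ []) :
    ((decF acc).map (fun p => p.2 + 1)).sum < (acc.map (fun p => p.2 + 1)).sum := by
  have := decF_sum acc
  have : 0 < acc.length := List.length_pos_iff.mpr h
  omega

-- group annotated gates into columns, level by level
def buildCols : List ((String × List Int × List Int) × Nat) → List (List (String × List Int × List Int))
  | [] => []
  | p :: acc =>
    ((p :: acc).filter (fun q => q.2 == 0)).map (·.1) :: buildCols (decF (p :: acc))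
  termination_by acc => ((acc.map (fun p => p.2 + 1)).sum)
  decreasing_by exact decF_measure _ (by simp)

theorem colFold_ge (g : String × List Int × List Int)
    (acc : List ((String × List Int × List Int) × Nat)) :
    ∀ c0, c0 ≤ colFold g c0 acc := by
  induction acc with
  | nil => intro c0; exact le_rfl
  | cons p acc ih =>
    intro c0
    simp only [colFold, List.foldl_cons]
    refine le_trans ?_ (ih _)
    split <;> omega

theorem colFold_ub (g : String × List Int × List Int)
    (acc : List ((String × List Int × List Int) × Nat)) :
    ∀ c0 p, p ∈ acc → gOv p.1 g → p.2 + 1 ≤ colFold g c0 acc := by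
  induction acc with
  | nil => intro _ p hp; cases hp
  | cons q acc ih =>
    intro c0 p hp hov
    simp only [colFold, List.foldl_cons]
    rcases List.mem_cons.mp hp with rfl | hp
    · rcases hov with ⟨h1, h2⟩
      by_cases hc : c0 < p.2 + 1
      · simp only [h1, h2, hc, and_self, if_true]
        exact colFold_ge g acc _
      · rw [if_neg (by omega)]
        exact le_trans (by omega) (colFold_ge g acc _)
    · exact ih _ p hp hov

theorem colFold_cases (g : String × List Int × List Int)
    (acc : List ((String × List Int × List Int) × Nat)) :
    ∀ c0, colFold g c0 acc = c0 ∨ ∃ p ∈ acc, gOv p.1 g ∧ colFold g c0 acc = p.2 + 1 := by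
  induction acc with
  | nil => intro c0; exact Or.inl rfl
  | cons q acc ih =>
    intro c0
    simp only [colFold, List.foldl_cons]
    by_cases hc : gLo q.1 ≤ gHi g ∧ gLo g ≤ gHi q.1 ∧ c0 < q.2 + 1
    · rw [if_pos hc]
      rcases ih (q.2 + 1) with h | ⟨p, hp, hov, h⟩
      · exact Or.inr ⟨q, List.mem_cons_self, ⟨hc.1, hc.2.1⟩, h⟩
      · exact Or.inr ⟨p, List.mem_cons_of_mem _ hp, hov, h⟩
    · rw [if_neg hc]
      rcases ih c0 with h | ⟨p, hp, hov, h⟩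
      · exact Or.inl h
      · exact Or.inr ⟨p, List.mem_cons_of_mem _ hp, hov, h⟩

theorem colOf_zero_iff (acc : List ((String × List Int × List Int) × Nat))
    (g : String × List Int × List Int) :
    colOf acc g = 0 ↔ ∀ p ∈ acc, ¬ gOv p.1 g := by
  constructor
  · intro h p hp hov
    have := colFold_ub g acc 0 p hp hov
    rw [colOf] at h; omega
  · intro h
    rcases colFold_cases g acc 0 with h0 | ⟨p, hp, hov, _⟩
    · exact h0
    · exact absurd hov (h p hp)

theorem colOf_decF (acc : List ((String × List Int × List Int) × Nat))
    (g : String × List Int × List Int) :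
    colOf (decF acc) g = colOf acc g - 1 := by
  refine Nat.le_antisymm ?_ ?_
  · rcases colFold_cases g (decF acc) 0 with h0 | ⟨q, hq, hov, h⟩
    · rw [colOf, h0]; omega
    · simp only [decF, List.mem_map, List.mem_filter] at hq
      rcases hq with ⟨p, ⟨hp, hpz⟩, rfl⟩
      have := colFold_ub g acc 0 p hp hov
      rw [colOf, h]
      simp at hpz
      rw [colOf]
      omega
  · rcases colFold_cases g acc 0 with h0 | ⟨p, hp, hov, h⟩
    · rw [colOf, h0]; omega
    · rw [colOf, h]
      by_cases hz : p.2 = 0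
      · omega
      · have hmem : (p.1, p.2 - 1) ∈ decF acc := by
          simp only [decF, List.mem_map, List.mem_filter]
          exact ⟨p, ⟨hp, by simpa using hz⟩, rfl⟩
        have := colFold_ub g (decF acc) 0 (p.1, p.2 - 1) hmem hov
        rw [colOf]
        omega

theorem annG_map_fst (ops : List (String × List Int × List Int)) :
    ∀ acc, (annG acc ops).map (·.1) = ops := by
  induction ops with
  | nil => intro acc; rfl
  | cons g t ih => intro acc; simp [annG, ih]

theorem decF_append (a b : List ((String × List Int × List Int) × Nat)) :
    decF (a ++ b) = decF a ++ decF b := by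
  simp [decF]

theorem annG_shift (ops : List (String × List Int × List Int)) :
    ∀ acc, annG (decF acc) (((annG acc ops).filter (fun p => p.2 != 0)).map (·.1))
      = decF (annG acc ops) := by
  induction ops with
  | nil => intro acc; rfl
  | cons g t ih =>
    intro acc
    by_cases hz : colOf acc g = 0
    · simp only [annG, hz, List.filter_cons]
      norm_num
      have hd : decF (acc ++ [(g, (0 : Nat))]) = decF acc := by
        simp [decF]
      rw [← hd, ih (acc ++ [(g, (0 : Nat))])]
      simp [decF]
    · have hd : decF (acc ++ [(g, colOf acc g)]) = decF acc ++ [(g, colOf acc g - 1)] := by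
        simp [decF, hz]
      have hc : decF ((g, colOf acc g) :: annG (acc ++ [(g, colOf acc g)]) t)
          = (g, colOf acc g - 1) :: decF (annG (acc ++ [(g, colOf acc g)]) t) := by
        simp [decF, hz]
      simp only [annG, List.filter_cons]
      rw [if_pos (by simpa using hz)]
      simp only [List.map_cons]
      simp only [annG]
      rw [colOf_decF, ← hd, ih (acc ++ [(g, colOf acc g)]), hc]

theorem buildCols_level_lt (acc : List ((String × List Int × List Int) × Nat)) :
    ∀ p ∈ acc, p.2 < (buildCols acc).length := by
  induction acc using buildCols.induct with
  | case1 => intro p hp; cases hp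
  | case2 q acc ih =>
    intro p hp
    rw [buildCols]
    simp only [List.length_cons]
    by_cases hz : p.2 = 0
    · omega
    · have hm : (p.1, p.2 - 1) ∈ decF (q :: acc) := by
        simp only [decF, List.mem_map, List.mem_filter]
        exact ⟨p, ⟨hp, by simpa using hz⟩, rfl⟩
      have := ih _ hm
      omega

theorem colOf_le_len (acc : List ((String × List Int × List Int) × Nat))
    (g : String × List Int × List Int) :
    colOf acc g ≤ (buildCols acc).length := by
  rcases colFold_cases g acc 0 with h0 | ⟨p, hp, _, h⟩
  · rw [colOf, h0]; omega
  · rw [colOf, h]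
    exact buildCols_level_lt acc p hp

theorem buildCols_snoc (c : Nat) :
    ∀ (acc : List ((String × List Int × List Int) × Nat)) (g : String × List Int × List Int),
    c ≤ (buildCols acc).length →
    buildCols (acc ++ [(g, c)]) =
      if c = (buildCols acc).length then buildCols acc ++ [[g]]
      else (buildCols acc).modify c (· ++ [g]) := by
  induction c with
  | zero =>
    intro acc g _
    cases acc with
    | nil => simp [buildCols, decF]
    | cons q acc =>
      rw [buildCols]
      rw [if_neg (by simp)]
      have h1 : buildCols ((q :: acc) ++ [(g, (0 : Nat))]) =
          (((q :: acc) ++ [(g, (0 : Nat))]).filter (fun p => p.2 == 0)).map (·.1)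
            :: buildCols (decF ((q :: acc) ++ [(g, (0 : Nat))])) := by
        rw [show (q :: acc) ++ [(g, (0 : Nat))] = q :: (acc ++ [(g, (0 : Nat))]) from rfl,
          buildCols]
      rw [h1]
      have h2 : decF ((q :: acc) ++ [(g, (0 : Nat))]) = decF (q :: acc) := by
        rw [decF_append]
        simp [decF]
      rw [h2, List.modify_zero_cons]
      by_cases hq : q.2 = 0 <;> simp [List.filter_append, hq]
  | succ c ih =>
    intro acc g hle
    cases acc with
    | nil => simp [buildCols] at hle
    | cons q acc =>
      have h2 : decF ((q :: acc) ++ [(g, c + 1)]) = decF (q :: acc) ++ [(g, c)] := by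
        rw [decF_append]
        simp [decF]
      have h1 : buildCols ((q :: acc) ++ [(g, c + 1)]) =
          ((q :: acc).filter (fun p => p.2 == 0)).map (·.1)
            :: buildCols (decF (q :: acc) ++ [(g, c)]) := by
        rw [show (q :: acc) ++ [(g, c + 1)] = q :: (acc ++ [(g, c + 1)]) from rfl, buildCols,
          ← List.cons_append, h2]
        by_cases hq : q.2 = 0 <;> simp [List.filter_append, hq]
      have hle' : c ≤ (buildCols (decF (q :: acc))).length := by
        rw [buildCols] at hle
        simp only [List.length_cons] at hle
        omega
      rw [h1, ih (decF (q :: acc)) g hle']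
      rw [buildCols]
      simp only [List.length_cons]
      by_cases hc : c = (buildCols (decF (q :: acc))).length
      · rw [if_pos hc, if_pos (by omega)]
        rfl
      · rw [if_neg hc, if_neg (by omega), List.modify_succ_cons]

theorem lo_le_hi (g : String × List Int × List Int) (h : g.2.1 ≠ []) : gLo g ≤ gHi g := by
  obtain ⟨m, hm⟩ : ∃ m, PySem.List.min? g.2.1 (fun x => x) = some m := by
    rcases h' : PySem.List.min? g.2.1 (fun x => x) with _ | m
    · exact absurd ((PySem.List.min?_eq_none_iff _ _).mp h') h
    · exact ⟨m, rfl⟩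
  obtain ⟨M, hM⟩ : ∃ M, PySem.List.max? g.2.1 (fun x => x) = some M := by
    rcases h' : PySem.List.max? g.2.1 (fun x => x) with _ | M
    · exact absurd ((PySem.List.max?_eq_none_iff _ _).mp h') h
    · exact ⟨M, rfl⟩
  have := PySem.List.max?_isMax hM m (PySem.List.min?_mem hm)
  simpa [gLo, gHi, hm, hM] using this

theorem altStep_spec (acc : List ((String × List Int × List Int) × Nat))
    (g : String × List Int × List Int) :
    altStep (buildCols acc, acc.map (fun p => (gLo p.1, gHi p.1, p.2))) g
      = (buildCols (acc ++ [(g, colOf acc g)]),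
         (acc ++ [(g, colOf acc g)]).map (fun p => (gLo p.1, gHi p.1, p.2))) := by
  have hcol : (acc.map (fun p => (gLo p.1, gHi p.1, p.2))).foldl
      (fun c p => if p.1 ≤ (PySem.List.max? g.2.1 (fun x => x)).getD 0 ∧
          (PySem.List.min? g.2.1 (fun x => x)).getD 0 ≤ p.2.1 ∧ c < p.2.2 + 1
        then p.2.2 + 1 else c) 0 = colOf acc g := by
    rw [List.foldl_map]
    rfl
  show (_, _) = _
  rw [hcol, buildCols_snoc _ _ _ (colOf_le_len acc g)]
  simp
  exact ⟨rfl, rfl⟩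

theorem alt_fold (ops : List (String × List Int × List Int)) :
    ∀ (acc : List ((String × List Int × List Int) × Nat)),
    (ops.foldl altStep (buildCols acc, acc.map (fun p => (gLo p.1, gHi p.1, p.2)))).1
      = buildCols (acc ++ annG acc ops) := by
  induction ops with
  | nil => intro acc; simp [annG]
  | cons g t ih =>
    intro acc
    rw [List.foldl_cons, altStep_spec, ih (acc ++ [(g, colOf acc g)])]
    simp [annG]

theorem alt_eq (ops : List (String × List Int × List Int)) :
    pack_gates_alt ops = buildCols (annG [] ops) := by
  have hb : buildCols ([] : List ((String × List Int × List Int) × Nat)) = [] := by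
    rw [buildCols]
  have h := alt_fold ops []
  rw [hb] at h
  simp only [List.map_nil, List.nil_append] at h
  rw [pack_gates_alt, h]

theorem passA_eq (ops : List (String × List Int × List Int)) :
    ∀ (acc : List ((String × List Int × List Int) × Nat)) (visited : Std.HashSet Int) cur unp,
    (∀ g ∈ ops, g.2.1 ≠ []) →
    (∀ p ∈ acc, gLo p.1 ≤ gHi p.1) →
    (∀ q : Int, q ∈ visited ↔ ∃ p ∈ acc, gLo p.1 ≤ q ∧ q ≤ gHi p.1) →
    packPassA ops visited cur unp =
      (cur ++ ((annG acc ops).filter (fun p => p.2 == 0)).map (·.1),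
       unp ++ ((annG acc ops).filter (fun p => p.2 != 0)).map (·.1)) := by
  induction ops with
  | nil => intro acc visited cur unp _ _ _; simp [packPassA, annG]
  | cons g t ih =>
    intro acc visited cur unp hpre hspan hcov
    have hg : g.2.1 ≠ [] := hpre g List.mem_cons_self
    have hlohi := lo_le_hi g hg
    have hplaced : ((PySem.List.pyRange (gLo g) (gHi g + 1) 1).all
        (fun q => !visited.contains q) = true) ↔ colOf acc g = 0 := by
      rw [List.all_eq_true, colOf_zero_iff]
      constructor
      · intro h p hp hov
        have hq : max (gLo g) (gLo p.1) ∈ visited :=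
          (hcov _).mpr ⟨p, hp, le_max_right _ _, max_le hov.2 (hspan p hp)⟩
        have h1 := hov.1
        have hmem := h (max (gLo g) (gLo p.1))
          (PySem.List.mem_pyRange_one.mpr ⟨le_max_left _ _, by omega⟩)
        rw [Bool.not_eq_eq_eq_not, Bool.not_true] at hmem
        rw [Std.HashSet.mem_iff_contains, hmem] at hq
        cases hq
      · intro h q hqr
        obtain ⟨h3, h4⟩ := PySem.List.mem_pyRange_one.mp hqr
        rw [Bool.not_eq_eq_eq_not, Bool.not_true]
        cases hcon : visited.contains q with
        | false => rfl
        | true =>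
          obtain ⟨p, hp, h1, h2⟩ := (hcov q).mp (Std.HashSet.mem_iff_contains.mpr hcon)
          exact absurd (⟨by omega, by omega⟩ : gOv p.1 g) (h p hp)
    have hcov' : ∀ q : Int, q ∈ (if g.2.1.length = 1 then visited.insertMany g.2.1
          else visited.insertMany (PySem.List.pyRange (gLo g) (gHi g + 1) 1)) ↔
        ∃ p ∈ acc ++ [(g, colOf acc g)], gLo p.1 ≤ q ∧ q ≤ gHi p.1 := by
      intro q
      by_cases hlen : g.2.1.length = 1
      · obtain ⟨x, hx⟩ := List.length_eq_one_iff.mp hlen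
        have hgl : gLo g = x := by
          simp [gLo, hx, PySem.List.min?_id_cons]
        have hgh : gHi g = x := by
          simp [gHi, hx, PySem.List.max?_id_cons]
        rw [if_pos hlen, Std.HashSet.mem_insertMany_list]
        simp only [List.mem_append, List.mem_singleton, hcov q, hx, List.contains_eq_mem,
          decide_eq_true_eq]
        constructor
        · rintro (⟨p, hp, h1, h2⟩ | hq)
          · exact ⟨p, Or.inl hp, h1, h2⟩
          · exact ⟨(g, colOf acc g), Or.inr rfl, by simp [hgl, hgh, hq]⟩
        · rintro ⟨p, hp | rfl, h1, h2⟩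
          · exact Or.inl ⟨p, hp, h1, h2⟩
          · have h1' : x ≤ q := by simpa [hgl] using h1
            have h2' : q ≤ x := by simpa [hgh] using h2
            right
            omega
      · rw [if_neg hlen, Std.HashSet.mem_insertMany_list]
        simp only [List.contains_eq_mem, decide_eq_true_eq, PySem.List.mem_pyRange_one,
          hcov q, List.mem_append, List.mem_singleton]
        constructor
        · rintro (⟨p, hp, h1, h2⟩ | ⟨h1, h2⟩)
          · exact ⟨p, Or.inl hp, h1, h2⟩
          · exact ⟨(g, colOf acc g), Or.inr rfl, h1, show q ≤ gHi g by omega⟩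
        · rintro ⟨p, hp | rfl, h1, h2⟩
          · exact Or.inl ⟨p, hp, h1, h2⟩
          · have h1' : gLo g ≤ q := h1
            have h2' : q ≤ gHi g := h2
            exact Or.inr ⟨h1', by omega⟩
    have hspan' : ∀ p ∈ acc ++ [(g, colOf acc g)], gLo p.1 ≤ gHi p.1 := by
      intro p hp
      rcases List.mem_append.mp hp with hp | hp
      · exact hspan p hp
      · simp at hp
        rw [hp]
        exact hlohi
    have hpre' : ∀ g' ∈ t, g'.2.1 ≠ [] := fun g' hg' => hpre g' (List.mem_cons_of_mem _ hg')
    have hih : ∀ cur' unp', packPassA t _ cur' unp' = _ :=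
      fun cur' unp' => ih (acc ++ [(g, colOf acc g)]) _ cur' unp' hpre' hspan' hcov'
    have elo : (PySem.List.min? g.2.1 fun x => x).getD 0 = gLo g := rfl
    have ehi : (PySem.List.max? g.2.1 fun x => x).getD 0 = gHi g := rfl
    by_cases hz : colOf acc g = 0
    · have hb : (PySem.List.pyRange (gLo g) (gHi g + 1) 1).all
          (fun q => !visited.contains q) = true := hplaced.mpr hz
      simp only [packPassA, elo, ehi, hb, if_true]
      rw [hz] at hih
      rw [hih (cur ++ [g]) unp]
      simp only [annG, hz, List.filter_cons]
      norm_num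
    · have hb : (PySem.List.pyRange (gLo g) (gHi g + 1) 1).all
          (fun q => !visited.contains q) = false := by
        rcases Bool.eq_false_or_eq_true ((PySem.List.pyRange (gLo g) (gHi g + 1) 1).all
          (fun q => !visited.contains q)) with h | h
        · exact absurd (hplaced.mp h) hz
        · exact h
      simp only [packPassA, elo, ehi, hb, Bool.false_eq_true, if_false]
      rw [hih cur (unp ++ [g])]
      simp only [annG, List.filter_cons]
      rw [if_neg (by simpa using hz), if_pos (by simpa using hz)]
      simp [List.append_assoc]

theorem annG_length (ops : List (String × List Int × List Int))
    (acc : List ((String × List Int × List Int) × Nat)) :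
    (annG acc ops).length = ops.length := by
  conv_rhs => rw [← annG_map_fst ops acc]
  simp

theorem loopA_eq (n : Nat) : ∀ (ops : List (String × List Int × List Int)),
    ops.length ≤ n → (∀ g ∈ ops, g.2.1 ≠ []) →
    packLoopA ops = buildCols (annG [] ops) := by
  induction n with
  | zero =>
    intro ops hlen _
    have h0 : ops = [] := List.eq_nil_of_length_eq_zero (by omega)
    subst h0
    rw [show annG [] ([] : List (String × List Int × List Int)) = [] from rfl,
      packLoopA, buildCols]
  | succ n ih =>
    intro ops hlen hpre
    cases ops with
    | nil =>
      rw [show annG [] ([] : List (String × List Int × List Int)) = [] from rfl,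
        packLoopA, buildCols]
    | cons g rest =>
      rw [packLoopA]
      have hpass := passA_eq (g :: rest) [] ∅ [] [] hpre
        (by intro p hp; cases hp)
        (by intro q; simp [Std.HashSet.not_mem_empty])
      simp only [hpass, List.nil_append]
      have hrfl : annG [] (g :: rest) = (g, (0 : Nat)) :: annG [(g, (0 : Nat))] rest := rfl
      have hsub : ∀ x ∈ ((annG [] (g :: rest)).filter (fun p => p.2 != 0)).map (·.1),
          x ∈ g :: rest := by
        intro x hx
        simp only [List.mem_map] at hx
        obtain ⟨p, hpf, rfl⟩ := hx
        have hp := List.mem_of_mem_filter hpf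
        have := List.mem_map_of_mem (f := fun p => p.1) hp
        rwa [annG_map_fst (g :: rest) []] at this
      have hul : (((annG [] (g :: rest)).filter (fun p => p.2 != 0)).map (·.1)).length
          ≤ rest.length := by
        rw [hrfl]
        simp only [List.filter_cons]
        norm_num
        calc (List.filter (fun p => p.2 != 0) (annG [(g, (0 : Nat))] rest)).length
            ≤ (annG [(g, (0 : Nat))] rest).length := List.length_filter_le _ _
          _ = rest.length := annG_length rest _
      have htail := ih (((annG [] (g :: rest)).filter (fun p => p.2 != 0)).map (·.1))
        (by simpa using le_trans hul (by simpa using Nat.le_of_succ_le_succ hlen))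
        (fun x hx => hpre x (hsub x hx))
      rw [htail]
      have hshift := annG_shift (g :: rest) []
      rw [show decF [] = ([] : List ((String × List Int × List Int) × Nat)) from rfl] at hshift
      rw [hshift]
      conv_rhs => rw [hrfl, buildCols]
      rw [hrfl]

-- ===== VERDICT (by name: the statement is the Claim_ definition above) =====
theorem pack_gates_spec : Claim_equal_pack_gates := by
  intro ops _ hpre
  show pack_gates ops = pack_gates_alt ops
  rw [alt_eq]
  exact loopA_eq ops.length ops le_rfl hpre
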